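-- pv_equiv track=rewrite | github.com/mooss/ktestable | tangled_ktestable_v2.py | string_transitive_closure
-- ===== SOURCE A (Python) =====
-- from collections import namedtuple, defaultdict
--
-- def string_transitive_closure(starting_components, infixes):
--     prefdict = defaultdict(set)
--     for inf in infixes:
--         prefdict[inf[:-1]].add(inf)
--
--     closure = set()
--     for pref in starting_components:
--         if pref in prefdict:
--             closure.update(prefdict.pop(pref))
--
--     result = set()
--     while closure:
--         el = closure.pop()
--         result.add(el)
--         if el[1:] in prefdict:
--            closure.update(prefdict.pop(el[1:]))
--     return result
-- ===== SOURCE B (Python) =====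
-- def string_transitive_closure(starting_components, infixes):
--     # Dict-free chaotic fixpoint iteration: no prefix index, no worklist.
--     # Repeatedly sweep the infix list, admitting every infix whose prefix
--     # inf[:-1] is an active prefix (a starting component or el[1:] of an
--     # already-admitted infix), until a sweep admits nothing new.
--     prefs = set(starting_components)
--     result = set()
--     changed = True
--     while changed:
--         changed = False
--         for inf in infixes:
--             if inf not in result and inf[:-1] in prefs:
--                 result.add(inf)
--                 prefs.add(inf[1:])
--                 changed = True
--     return result
-- ===== Notes on version B (the rewrite author's own statement) =====
-- stated objective: simpler
-- what changed: B replaces A's prefix dictionary plus destructive worklist search by dict-free chaotic fixpoint iteration: it repeatedly sweeps the infix list, admitting any infix whose prefix is currently active, until a sweep admits nothing new.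
import Mathlib
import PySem

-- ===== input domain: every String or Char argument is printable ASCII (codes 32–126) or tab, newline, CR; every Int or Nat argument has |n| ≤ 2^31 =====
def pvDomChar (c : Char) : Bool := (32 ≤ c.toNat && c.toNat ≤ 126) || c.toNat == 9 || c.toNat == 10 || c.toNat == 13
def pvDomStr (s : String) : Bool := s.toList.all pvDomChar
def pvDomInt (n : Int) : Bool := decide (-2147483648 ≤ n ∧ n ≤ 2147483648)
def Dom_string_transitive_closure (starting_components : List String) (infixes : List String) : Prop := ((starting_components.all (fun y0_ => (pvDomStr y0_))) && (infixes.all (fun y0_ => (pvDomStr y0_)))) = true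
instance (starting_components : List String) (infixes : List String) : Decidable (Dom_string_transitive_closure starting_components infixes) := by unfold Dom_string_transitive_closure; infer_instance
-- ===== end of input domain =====

-- B replaces A's prefix dictionary + destructive worklist search by dict-free chaotic
-- fixpoint iteration (repeated sweeps over the infix list until a sweep admits nothing
-- new); objective: simpler. Both Pythons return a set (no observable element order), so
-- both ports return the sorted list of the result set's elements as its canonical
-- representative.


-- ===== PORT A =====
-- shared key functions: inf[:-1] and el[1:]
def pvKey (s : String) : String := PySem.Str.slice s none (some (-1))
def pvNext (s : String) : String := PySem.Str.slice s (some 1) none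

-- total size of the dict's set-values (termination measure for A's while loop)
def pvWeight (its : List (String × PySem.Set String)) : Nat :=
  (its.map (fun kv => kv.2.length)).sum

theorem pvWeight_cons (a : String × PySem.Set String) (t : List (String × PySem.Set String)) :
    pvWeight (a :: t) = a.2.length + pvWeight t := by simp [pvWeight]

theorem pvWeight_filter_le (p : String × PySem.Set String → Bool)
    (its : List (String × PySem.Set String)) : pvWeight (its.filter p) ≤ pvWeight its := by
  induction its with
  | nil => simp [pvWeight]
  | cons a t ih =>
    rw [List.filter_cons]
    split
    · rw [pvWeight_cons, pvWeight_cons]; omega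
    · rw [pvWeight_cons]; omega

theorem pvWeight_pop (d : PySem.Dict String (PySem.Set String)) (k : String)
    (v : PySem.Set String) (h : d.get? k = some v) :
    pvWeight (d.erase k).items + v.length ≤ pvWeight d.items := by
  obtain ⟨its⟩ := d
  simp only [PySem.Dict.get?, PySem.Dict.erase] at h ⊢
  induction its with
  | nil => simp at h
  | cons a t ih =>
    by_cases ha : (a.1 == k) = true
    · have hf : List.find? (fun p => p.1 == k) (a :: t) = some a := by
        rw [List.find?_cons]; simp [ha]
      rw [hf] at h
      simp at h
      subst h
      have h2 := pvWeight_filter_le (fun p => !(p.1 == k)) t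
      rw [List.filter_cons, if_neg (by simp [ha]), pvWeight_cons]
      omega
    · have hf : List.find? (fun p => p.1 == k) (a :: t) = List.find? (fun p => p.1 == k) t := by
        rw [List.find?_cons]; simp [ha]
      rw [hf] at h
      have h2 := ih h
      rw [List.filter_cons, if_pos (by simp [ha]), pvWeight_cons, pvWeight_cons]
      omega

theorem pvLength_add_le (s : PySem.Set String) (x : String) :
    (PySem.Set.add s x).length ≤ s.length + 1 := by
  rw [PySem.Set.add]; split <;> simp

theorem pvLength_update_le (s : PySem.Set String) (xs : List String) :
    (PySem.Set.update s xs).length ≤ s.length + xs.length := by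
  induction xs generalizing s with
  | nil => simp [PySem.Set.update]
  | cons x t ih =>
    have h1 := pvLength_add_le s x
    have h2 := ih (PySem.Set.add s x)
    rw [PySem.Set.update] at h2 ⊢
    rw [List.foldl_cons]
    simp only [List.length_cons]
    omega

-- one step of A's first loop: 'if pref in prefdict: closure.update(prefdict.pop(pref))'
def pvStep1 (st : PySem.Set String × PySem.Dict String (PySem.Set String)) (pref : String) :
    PySem.Set String × PySem.Dict String (PySem.Set String) :=
  match st.2.pop? pref with
  | some (entry, d') => (PySem.Set.update st.1 entry, d')
  | none => st

-- A's while loop; closure.pop() is ported as removing the first (insertion-order) element,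
-- which is sound because the returned set does not depend on the pop order.
def pvLoopA (cl : PySem.Set String) (d : PySem.Dict String (PySem.Set String))
    (result : PySem.Set String) : PySem.Set String :=
  match cl with
  | [] => result
  | el :: rest =>
    match h : d.pop? (pvNext el) with
    | some (entry, d') =>
        pvLoopA (PySem.Set.update rest entry) d' (PySem.Set.add result el)
    | none => pvLoopA rest d (PySem.Set.add result el)
termination_by cl.length + pvWeight d.items
decreasing_by
  · have h1 := pvLength_update_le rest entry
    have h2 : d.get? (pvNext el) = some entry ∧ d' = d.erase (pvNext el) := by
      rw [PySem.Dict.pop?] at h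
      cases hg : d.get? (pvNext el) <;> rw [hg] at h <;> simp at h
      exact ⟨congrArg some h.1, h.2.symm⟩
    have h3 := pvWeight_pop d (pvNext el) entry h2.1
    rw [h2.2]
    simp only [List.length_cons]
    omega
  · simp only [List.length_cons]
    omega

def string_transitive_closure (starting_components : List String) (infixes : List String) : List String :=
  let prefdict := infixes.foldl
    (fun d inf => d.modify (pvKey inf) PySem.Set.empty (fun s => PySem.Set.add s inf))
    PySem.Dict.empty
  let st := starting_components.foldl pvStep1 (PySem.Set.empty, prefdict)
  -- the Python returns a set: the sorted list of its elements is the canonical representative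
  PySem.List.sorted (pvLoopA st.1 st.2 PySem.Set.empty) (fun x => x) false

-- ===== PORT B =====
-- one guarded step of B's sweep:
-- 'if inf not in result and inf[:-1] in prefs: result.add(inf); prefs.add(inf[1:]); changed = True'
-- state = (prefs, result, changed)
def pvSweepStep (st : PySem.Set String × PySem.Set String × Bool) (inf : String) :
    PySem.Set String × PySem.Set String × Bool :=
  if inf ∉ st.2.1 ∧ pvKey inf ∈ st.1 then
    (PySem.Set.add st.1 (pvNext inf), PySem.Set.add st.2.1 inf, true)
  else st

-- shape of one sweep: the result only grows, grows only by infixes, and the changed flag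
-- is raised only when a new infix entered the result (termination measure support)
theorem pvSweep_shape (l : List String) (p r : PySem.Set String) (b : Bool) :
    (∀ x ∈ r, x ∈ (l.foldl pvSweepStep (p, r, b)).2.1) ∧
    (∀ x ∈ (l.foldl pvSweepStep (p, r, b)).2.1, x ∈ r ∨ (x ∈ l ∧ x ∉ r)) ∧
    ((l.foldl pvSweepStep (p, r, b)).2.2 = true →
      b = true ∨ ∃ e, e ∈ l ∧ e ∉ r ∧ e ∈ (l.foldl pvSweepStep (p, r, b)).2.1) := by
  induction l generalizing p r b with
  | nil => exact ⟨fun x hx => hx, fun x hx => Or.inl hx, fun h => Or.inl h⟩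
  | cons inf t ih =>
    rw [List.foldl_cons]
    by_cases hg : inf ∉ r ∧ pvKey inf ∈ p
    · rw [pvSweepStep, if_pos hg]
      obtain ⟨ih1, ih2, _⟩ := ih (PySem.Set.add p (pvNext inf)) (PySem.Set.add r inf) true
      refine ⟨?_, ?_, ?_⟩
      · intro x hx
        exact ih1 x ((PySem.Set.mem_add ..).mpr (Or.inl hx))
      · intro x hx
        rcases ih2 x hx with h1 | h2
        · rcases (PySem.Set.mem_add ..).mp h1 with h3 | h3
          · exact Or.inl h3
          · exact Or.inr ⟨h3 ▸ List.mem_cons_self .., h3 ▸ hg.1⟩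
        · exact Or.inr ⟨List.mem_cons_of_mem _ h2.1,
            fun hc => h2.2 ((PySem.Set.mem_add ..).mpr (Or.inl hc))⟩
      · intro _
        exact Or.inr ⟨inf, List.mem_cons_self .., hg.1,
          ih1 inf ((PySem.Set.mem_add ..).mpr (Or.inr rfl))⟩
    · rw [pvSweepStep, if_neg hg]
      obtain ⟨ih1, ih2, ih3⟩ := ih p r b
      exact ⟨ih1, fun x hx => (ih2 x hx).imp id (fun h => ⟨List.mem_cons_of_mem _ h.1, h.2⟩),
        fun h => (ih3 h).imp id (fun ⟨e, h1, h2, h3⟩ => ⟨e, List.mem_cons_of_mem _ h1, h2, h3⟩)⟩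

-- a strictly better filter is strictly shorter (termination measure support)
theorem pvFilter_lt (xs r r' : List String) (hsub : ∀ x ∈ r, x ∈ r') (e : String)
    (he1 : e ∈ xs) (he2 : e ∉ r) (he3 : e ∈ r') :
    (xs.filter (fun x => decide (x ∉ r'))).length <
      (xs.filter (fun x => decide (x ∉ r))).length := by
  have mono : ∀ ys : List String, (ys.filter (fun x => decide (x ∉ r'))).length ≤
      (ys.filter (fun x => decide (x ∉ r))).length := by
    intro ys
    induction ys with
    | nil => simp
    | cons a t iht =>
      rw [List.filter_cons, List.filter_cons]
      by_cases ha' : a ∈ r'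
      · rw [show (decide (a ∉ r')) = false by simp [ha']]
        by_cases ha : a ∈ r
        · rw [show (decide (a ∉ r)) = false by simp [ha]]
          simp only [Bool.false_eq_true, if_false]
          exact iht
        · rw [show (decide (a ∉ r)) = true by simp [ha]]
          simp only [Bool.false_eq_true, if_false, if_true, List.length_cons]
          omega
      · have ha : a ∉ r := fun hc => ha' (hsub a hc)
        rw [show (decide (a ∉ r')) = true by simp [ha'],
          show (decide (a ∉ r)) = true by simp [ha]]
        simp only [Bool.false_eq_true, if_false, if_true, List.length_cons]
        exact Nat.succ_le_succ iht
  induction xs with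
  | nil => cases he1
  | cons a t iht =>
    rw [List.filter_cons, List.filter_cons]
    by_cases hae : a = e
    · subst hae
      rw [show (decide (a ∉ r')) = false by simp [he3],
        show (decide (a ∉ r)) = true by simp [he2]]
      simp only [Bool.false_eq_true, if_false, if_true, List.length_cons]
      exact Nat.lt_succ_of_le (mono t)
    · have he1' : e ∈ t := by
        rcases List.mem_cons.mp he1 with h | h
        · exact absurd h.symm hae
        · exact h
      have hlt := iht he1'
      by_cases ha' : a ∈ r'
      · rw [show (decide (a ∉ r')) = false by simp [ha']]
        by_cases ha : a ∈ r
        · rw [show (decide (a ∉ r)) = false by simp [ha]]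
          simp only [Bool.false_eq_true, if_false]
          exact hlt
        · rw [show (decide (a ∉ r)) = true by simp [ha]]
          simp only [Bool.false_eq_true, if_false, if_true, List.length_cons]
          omega
      · have ha : a ∉ r := fun hc => ha' (hsub a hc)
        rw [show (decide (a ∉ r')) = true by simp [ha'],
          show (decide (a ∉ r)) = true by simp [ha]]
        simp only [Bool.false_eq_true, if_false, if_true, List.length_cons]
        omega

-- B's while loop: sweep; if the flag was raised, go round again, else return the result
def pvFix (infixes : List String) (prefs result : PySem.Set String) : PySem.Set String :=
  if (infixes.foldl pvSweepStep (prefs, result, false)).2.2 = true then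
    pvFix infixes (infixes.foldl pvSweepStep (prefs, result, false)).1
      (infixes.foldl pvSweepStep (prefs, result, false)).2.1
  else (infixes.foldl pvSweepStep (prefs, result, false)).2.1
termination_by (infixes.filter (fun x => decide (x ∉ result))).length
decreasing_by
  rename_i hflag
  rw [show (List.foldl (fun s (x : {x // x ∈ infixes}) => pvSweepStep s x.1)
      (prefs, result, false) infixes.attach) = infixes.foldl pvSweepStep (prefs, result, false)
    from List.foldl_attach] at hflag ⊢
  obtain ⟨h1, _, h3⟩ := pvSweep_shape infixes prefs result false
  rcases h3 hflag with hc | ⟨e, he1, he2, he3⟩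
  · exact absurd hc (by simp)
  · exact pvFilter_lt infixes result _ h1 e he1 he2 he3

def string_transitive_closure_alt (starting_components : List String) (infixes : List String) : List String :=
  -- the Python returns a set: the sorted list of its elements is the canonical representative
  PySem.List.sorted (pvFix infixes (PySem.Set.ofList starting_components) PySem.Set.empty)
    (fun x => x) false

-- ===== PRECONDITION & SPEC =====
def Spec_string_transitive_closure (starting_components : List String) (infixes : List String) (out : List String) : Prop := out = string_transitive_closure_alt starting_components infixes
instance (starting_components : List String) (infixes : List String) (out : List String) : Decidable (Spec_string_transitive_closure starting_components infixes out) := by unfold Spec_string_transitive_closure; infer_instance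

-- ===== CLAIM (what is proved, stated in full; the proofs are below) =====
def Claim_equal_string_transitive_closure : Prop := ∀ (starting_components : List String) (infixes : List String), Dom_string_transitive_closure starting_components infixes → Spec_string_transitive_closure starting_components infixes (string_transitive_closure starting_components infixes)

-- ===== LEMMAS AND PROOFS =====

-- ---- proof-only helper: an immutable-dict worklist search, the bridge between
-- ---- A's destructive-dict loop (pvSim below) and B's fixpoint (PvReach below)

-- remaining weight of the unvisited part of the (immutable) dict: termination measure
def pvRemW (its : List (String × PySem.Set String)) (visited : List String) : Nat :=
  pvWeight (its.filter (fun kv => !(decide (kv.1 ∈ visited))))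

theorem pvRemW_mono_add (its : List (String × PySem.Set String)) (visited : PySem.Set String)
    (pref : String) : pvRemW its (PySem.Set.add visited pref) ≤ pvRemW its visited := by
  induction its with
  | nil => simp [pvRemW]
  | cons a t ih =>
    rw [pvRemW, pvRemW, List.filter_cons, List.filter_cons]
    rw [pvRemW, pvRemW] at ih
    by_cases hm : a.1 ∈ PySem.Set.add visited pref
    · rw [if_neg (by simp [hm])]
      by_cases hv : a.1 ∈ visited
      · rw [if_neg (by simp [hv])]; exact ih
      · rw [if_pos (by simp [hv]), pvWeight_cons]; omega
    · have hv : a.1 ∉ visited := fun hc => hm ((PySem.Set.mem_add ..).mpr (Or.inl hc))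
      rw [if_pos (by simp [hm]), if_pos (by simp [hv]), pvWeight_cons, pvWeight_cons]
      omega

theorem pvRemW_add (d : PySem.Dict String (PySem.Set String)) (visited : PySem.Set String)
    (pref : String) (h : pref ∉ visited) :
    (d.getD pref PySem.Set.empty).length + pvRemW d.items (PySem.Set.add visited pref)
      ≤ pvRemW d.items visited := by
  obtain ⟨its⟩ := d
  simp only [PySem.Dict.getD, PySem.Dict.get?]
  induction its with
  | nil => simp [pvRemW, PySem.Set.empty]
  | cons a t ih =>
    rw [pvRemW, pvRemW, List.filter_cons, List.filter_cons]
    rw [pvRemW, pvRemW] at ih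
    by_cases hae : a.1 = pref
    · have hv : a.1 ∉ visited := hae ▸ h
      have hm : a.1 ∈ PySem.Set.add visited pref := (PySem.Set.mem_add ..).mpr (Or.inr hae)
      have hf : List.find? (fun p => p.1 == pref) (a :: t) = some a := by
        rw [List.find?_cons]; simp [hae]
      rw [hf, if_neg (by simp [hm]), if_pos (by simp [hv]), pvWeight_cons]
      have h2 := pvRemW_mono_add t visited pref
      rw [pvRemW, pvRemW] at h2
      simp only [Option.map_some, Option.getD_some]
      omega
    · have hmm : (a.1 ∈ PySem.Set.add visited pref) ↔ (a.1 ∈ visited) := by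
        rw [PySem.Set.mem_add ..]
        exact ⟨fun hc => hc.elim id (fun he => absurd he hae), Or.inl⟩
      have hf : List.find? (fun p => p.1 == pref) (a :: t) = List.find? (fun p => p.1 == pref) t := by
        have hbf : (a.1 == pref) = false := beq_eq_false_iff_ne.mpr hae
        rw [List.find?_cons]; simp [hbf]
      rw [hf]
      by_cases hv : a.1 ∈ visited
      · rw [if_neg (by simp [hmm, hv]), if_neg (by simp [hv])]
        exact ih
      · rw [if_pos (by simp; exact ⟨hv, hae⟩), if_pos (by simp [hv]),
          pvWeight_cons, pvWeight_cons]
        omega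

-- the worklist search over the immutable dict (proof-only)
def pvLoopB (queue : List String) (visited : PySem.Set String) (result : PySem.Set String)
    (d : PySem.Dict String (PySem.Set String)) : PySem.Set String :=
  match queue with
  | [] => result
  | pref :: rest =>
    if pref ∈ visited then
      pvLoopB rest visited result d
    else
      pvLoopB (rest ++ (d.getD pref PySem.Set.empty).map pvNext) (PySem.Set.add visited pref)
        (PySem.Set.update result (d.getD pref PySem.Set.empty)) d
termination_by queue.length + pvRemW d.items visited
decreasing_by
  · simp only [List.length_cons]; omega
  · have h2 := pvRemW_add d visited pref (by assumption)
    simp only [List.length_cons, List.length_append, List.length_map] at h2 ⊢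
    omega

-- unfolding equations for the two loops
theorem pvLoopA_nil (d : PySem.Dict String (PySem.Set String)) (result : PySem.Set String) :
    pvLoopA [] d result = result := by rw [pvLoopA]

theorem pvLoopA_cons (el : String) (rest : List String)
    (d : PySem.Dict String (PySem.Set String)) (result : PySem.Set String) :
    pvLoopA (el :: rest) d result =
      match d.pop? (pvNext el) with
      | some (entry, d') => pvLoopA (PySem.Set.update rest entry) d' (PySem.Set.add result el)
      | none => pvLoopA rest d (PySem.Set.add result el) := by
  rw [pvLoopA]
  cases hp : d.pop? (pvNext el) with
  | none => rfl
  | some pr => rfl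

theorem pvLoopB_nil (visited result : PySem.Set String)
    (d : PySem.Dict String (PySem.Set String)) : pvLoopB [] visited result d = result := by
  rw [pvLoopB]

theorem pvLoopB_cons (pref : String) (rest : List String) (visited result : PySem.Set String)
    (d : PySem.Dict String (PySem.Set String)) :
    pvLoopB (pref :: rest) visited result d =
      if pref ∈ visited then pvLoopB rest visited result d
      else pvLoopB (rest ++ (d.getD pref PySem.Set.empty).map pvNext)
        (PySem.Set.add visited pref)
        (PySem.Set.update result (d.getD pref PySem.Set.empty)) d := by rw [pvLoopB]

-- lookup in an erased dict
theorem pvGet?_erase (d : PySem.Dict String (PySem.Set String)) (k k' : String) :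
    (d.erase k).get? k' = if k' = k then none else d.get? k' := by
  obtain ⟨its⟩ := d
  simp only [PySem.Dict.erase, PySem.Dict.get?]
  by_cases hk : k' = k
  · subst hk
    rw [if_pos rfl]
    have hf : List.find? (fun p => p.1 == k') (its.filter (fun p => !(p.1 == k'))) = none := by
      apply List.find?_eq_none.mpr
      intro x hx
      simpa using (List.mem_filter.mp hx).2
    rw [hf]; rfl
  · rw [if_neg hk]
    congr 1
    induction its with
    | nil => rfl
    | cons a t ih =>
      rw [List.filter_cons]
      by_cases ha : (a.1 == k) = true
      · have hae : a.1 = k := by simpa using ha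
        have h2 : ¬ a.1 = k' := fun hc => hk (by rw [← hc, hae])
        have hbf : (a.1 == k') = false := beq_eq_false_iff_ne.mpr (fun hc => h2 hc)
        rw [if_neg (by simp [ha]), List.find?_cons]
        simp only [hbf]
        exact ih
      · rw [if_pos (by simp [ha]), List.find?_cons, List.find?_cons]
        cases hbk : (a.1 == k') with
        | false => simp only [hbk]; exact ih
        | true => simp only [hbk]

-- every value stored in the prefix dict is duplicate-free and keyed by its own prefix
theorem pvDictInv (l : List String) (d : PySem.Dict String (PySem.Set String))
    (h : ∀ k v, d.get? k = some v → v.Nodup ∧ ∀ e ∈ v, pvKey e = k) :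
    ∀ k v, (l.foldl (fun d inf =>
        d.modify (pvKey inf) PySem.Set.empty (fun s => PySem.Set.add s inf))
        d).get? k = some v → v.Nodup ∧ ∀ e ∈ v, pvKey e = k := by
  induction l generalizing d with
  | nil => simpa using h
  | cons inf t ih =>
    rw [List.foldl_cons]
    apply ih
    intro k v hv
    rw [PySem.Dict.modify, PySem.Dict.get?_insert] at hv
    by_cases hk : k = pvKey inf
    · rw [if_pos hk] at hv
      have hbase : (d.getD (pvKey inf) PySem.Set.empty).Nodup ∧
          ∀ e ∈ d.getD (pvKey inf) PySem.Set.empty, pvKey e = pvKey inf := by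
        cases hg : d.get? (pvKey inf) with
        | none =>
          rw [PySem.Dict.getD_eq_get?_getD, hg]
          exact ⟨List.nodup_nil, by intro e he; simp [PySem.Set.empty] at he⟩
        | some w =>
          rw [PySem.Dict.getD_of_get?_eq_some _ _ hg]
          exact h _ _ hg
      injection hv with hv
      constructor
      · rw [← hv]; exact PySem.Set.nodup_add _ _ hbase.1
      · intro e he
        rw [← hv] at he
        rcases (PySem.Set.mem_add ..).mp he with h1 | h2
        · rw [hbase.2 e h1, hk]
        · rw [h2, hk]
    · rw [if_neg hk] at hv
      exact h _ _ hv

-- every value stored in the prefix dict consists of listed infixes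
theorem pvDictValsMem (I : List String) : ∀ (l : List String)
    (d : PySem.Dict String (PySem.Set String)), (∀ x ∈ l, x ∈ I) →
    (∀ k v, d.get? k = some v → ∀ e ∈ v, e ∈ I) →
    ∀ k v, (l.foldl (fun d inf =>
        d.modify (pvKey inf) PySem.Set.empty (fun s => PySem.Set.add s inf))
        d).get? k = some v → ∀ e ∈ v, e ∈ I := by
  intro l
  induction l with
  | nil => intro d _ h; simpa using h
  | cons inf t ih =>
    intro d hl h
    rw [List.foldl_cons]
    apply ih _ (fun x hx => hl x (List.mem_cons_of_mem _ hx))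
    intro k v hv
    rw [PySem.Dict.modify, PySem.Dict.get?_insert] at hv
    by_cases hk : k = pvKey inf
    · rw [if_pos hk] at hv
      injection hv with hv
      intro e he
      rw [← hv] at he
      rcases (PySem.Set.mem_add ..).mp he with h1 | h2
      · cases hg : d.get? (pvKey inf) with
        | none =>
          rw [PySem.Dict.getD_eq_get?_getD, hg] at h1
          simp [PySem.Set.empty] at h1
        | some w =>
          rw [PySem.Dict.getD_of_get?_eq_some _ _ hg] at h1
          exact h _ _ hg e h1
      · exact h2 ▸ hl inf (List.mem_cons_self ..)
    · rw [if_neg hk] at hv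
      exact h _ _ hv

-- every listed infix is stored in the prefix dict under its own prefix
theorem pvDictMem : ∀ (l : List String) (d : PySem.Dict String (PySem.Set String))
    (x : String), (x ∈ l ∨ x ∈ d.getD (pvKey x) PySem.Set.empty) →
    x ∈ (l.foldl (fun d inf =>
        d.modify (pvKey inf) PySem.Set.empty (fun s => PySem.Set.add s inf))
        d).getD (pvKey x) PySem.Set.empty := by
  intro l
  induction l with
  | nil =>
    intro d x h
    simpa using h.resolve_left (by simp)
  | cons inf t ih =>
    intro d x h
    rw [List.foldl_cons]
    apply ih
    rcases h with h | h
    · rcases List.mem_cons.mp h with h1 | h1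
      · right
        subst h1
        rw [PySem.Dict.getD_modify_self]
        exact (PySem.Set.mem_add ..).mpr (Or.inr rfl)
      · exact Or.inl h1
    · right
      rw [PySem.Dict.getD_modify]
      by_cases hk : pvKey x = pvKey inf
      · rw [if_pos hk, ← hk]
        exact (PySem.Set.mem_add ..).mpr (Or.inl h)
      · rw [if_neg hk]
        exact h

-- simulation: A's pop-the-dict search and the immutable-dict worklist search agree
theorem pvSim (d0 : PySem.Dict String (PySem.Set String))
    (Hk : ∀ k v, d0.get? k = some v → v.Nodup ∧ ∀ e ∈ v, pvKey e = k) :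
    ∀ (N : Nat) (P C : List String) (dA : PySem.Dict String (PySem.Set String))
      (RA visited : PySem.Set String),
      P.length + C.length + pvRemW d0.items visited ≤ N →
      (RA ++ C).Nodup →
      (∀ k, dA.get? k = if k ∈ visited then none else d0.get? k) →
      (∀ x ∈ RA ++ C, dA.get? (pvKey x) = none) →
      pvLoopA (P.foldl pvStep1 (C, dA)).1 (P.foldl pvStep1 (C, dA)).2 RA
        = pvLoopB (P ++ C.map pvNext) visited (RA ++ C) d0 := by
  intro N
  induction N with
  | zero =>
    intro P C dA RA visited hb hnd hI3 hI4
    match P, C with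
    | [], [] => simp [pvLoopA_nil, pvLoopB_nil]
    | p :: _, _ => simp at hb
    | [], c :: _ => simp at hb
  | succ N ih =>
    intro P C dA RA visited hb hnd hI3 hI4
    -- the common step: B is about to process prefix `pref`, A performs the matching
    -- 'if pref in prefdict: closure.update(prefdict.pop(pref))'
    have step : ∀ (pref : String) (P' C : List String)
        (dA : PySem.Dict String (PySem.Set String)) (RA visited : PySem.Set String),
        P'.length + C.length + pvRemW d0.items visited + 1 ≤ N + 1 →
        (RA ++ C).Nodup →
        (∀ k, dA.get? k = if k ∈ visited then none else d0.get? k) →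
        (∀ x ∈ RA ++ C, dA.get? (pvKey x) = none) →
        pvLoopA (P'.foldl pvStep1 (pvStep1 (C, dA) pref)).1
            (P'.foldl pvStep1 (pvStep1 (C, dA) pref)).2 RA
          = pvLoopB (pref :: (P' ++ C.map pvNext)) visited (RA ++ C) d0 := by
      intro pref P' C dA RA visited hb hnd hI3 hI4
      rw [pvLoopB_cons]
      by_cases hv : pref ∈ visited
      · -- already consumed: both sides skip
        have hgA : dA.get? pref = none := by rw [hI3, if_pos hv]
        have hstep : pvStep1 (C, dA) pref = (C, dA) := by
          simp [pvStep1, PySem.Dict.pop?, hgA]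
        rw [if_pos hv, hstep]
        exact ih P' C dA RA visited (by omega) hnd hI3 hI4
      · rw [if_neg hv]
        cases hg : d0.get? pref with
        | none =>
          -- prefix indexes nothing: both sides are no-ops apart from marking it visited
          have hgA : dA.get? pref = none := by rw [hI3, if_neg hv, hg]
          have hstep : pvStep1 (C, dA) pref = (C, dA) := by
            simp [pvStep1, PySem.Dict.pop?, hgA]
          have hentry : d0.getD pref PySem.Set.empty = PySem.Set.empty := by
            rw [PySem.Dict.getD_eq_get?_getD, hg]
            rfl
          rw [hstep, hentry]
          have hmono := pvRemW_mono_add d0.items visited pref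
          have hI3' : ∀ k, dA.get? k =
              if k ∈ PySem.Set.add visited pref then none else d0.get? k := by
            intro k
            by_cases hk : k = pref
            · rw [if_pos ((PySem.Set.mem_add ..).mpr (Or.inr hk))]
              rw [hk]; exact hgA
            · by_cases hkv : k ∈ visited
              · rw [if_pos ((PySem.Set.mem_add ..).mpr (Or.inl hkv)), hI3, if_pos hkv]
              · rw [if_neg (fun hc => ((PySem.Set.mem_add ..).mp hc).elim hkv hk),
                  hI3, if_neg hkv]
          have := ih P' C dA RA (PySem.Set.add visited pref) (by omega) hnd hI3' hI4
          simpa [PySem.Set.empty, PySem.Set.update_nil] using this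
        | some entry =>
          -- pref indexes `entry`: A pops it into the closure, B records it in the result
          have hgA : dA.get? pref = some entry := by rw [hI3, if_neg hv, hg]
          have hstep : pvStep1 (C, dA) pref = (PySem.Set.update C entry, dA.erase pref) := by
            simp [pvStep1, PySem.Dict.pop?, hgA]
          have hentryD : d0.getD pref PySem.Set.empty = entry :=
            PySem.Dict.getD_of_get?_eq_some _ _ hg
          obtain ⟨hnodE, hkeyE⟩ := Hk pref entry hg
          have hdisj : ∀ x ∈ entry, x ∉ RA ++ C := by
            intro x hx hmem
            have h2 := hI4 x hmem
            rw [hkeyE x hx, hgA] at h2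
            cases h2
          have hCupd : PySem.Set.update C entry = C ++ entry :=
            PySem.Set.update_eq_append_of_disjoint C entry hnodE
              (fun x hx hc => hdisj x hx (List.mem_append.mpr (Or.inr hc)))
          have hRupd : PySem.Set.update (RA ++ C) entry = (RA ++ C) ++ entry :=
            PySem.Set.update_eq_append_of_disjoint _ entry hnodE hdisj
          rw [hstep, hCupd, hentryD, hRupd]
          have hb' : P'.length + (C ++ entry).length +
              pvRemW d0.items (PySem.Set.add visited pref) ≤ N := by
            have h2 := pvRemW_add d0 visited pref hv
            rw [hentryD] at h2
            simp only [List.length_append]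
            omega
          have hnd' : (RA ++ (C ++ entry)).Nodup := by
            rw [← List.append_assoc]
            exact hnd.append hnodE (fun a ha ha' => hdisj a ha' ha)
          have hI3' : ∀ k, (dA.erase pref).get? k =
              if k ∈ PySem.Set.add visited pref then none else d0.get? k := by
            intro k
            rw [pvGet?_erase]
            by_cases hk : k = pref
            · rw [if_pos hk, if_pos ((PySem.Set.mem_add ..).mpr (Or.inr hk))]
            · rw [if_neg hk]
              by_cases hkv : k ∈ visited
              · rw [if_pos ((PySem.Set.mem_add ..).mpr (Or.inl hkv)), hI3, if_pos hkv]
              · rw [if_neg (fun hc => ((PySem.Set.mem_add ..).mp hc).elim hkv hk),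
                  hI3, if_neg hkv]
          have hI4' : ∀ x ∈ RA ++ (C ++ entry), (dA.erase pref).get? (pvKey x) = none := by
            intro x hx
            rw [pvGet?_erase]
            by_cases hk : pvKey x = pref
            · rw [if_pos hk]
            · rw [if_neg hk]
              have hx' : x ∈ RA ++ C := by
                rcases List.mem_append.mp hx with h1 | h2
                · exact List.mem_append.mpr (Or.inl h1)
                · rcases List.mem_append.mp h2 with h3 | h4
                  · exact List.mem_append.mpr (Or.inr h3)
                  · exact absurd (hkeyE x h4) hk
              exact hI4 x hx'
          have := ih P' (C ++ entry) (dA.erase pref) RA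
            (PySem.Set.add visited pref) hb' hnd' hI3' hI4'
          rw [this]
          rw [List.append_assoc, ← List.map_append, List.append_assoc]
    cases P with
    | cons pref P' =>
      rw [List.foldl_cons]
      exact step pref P' C dA RA visited (by simp only [List.length_cons] at hb; omega) hnd hI3 hI4
    | nil =>
      cases C with
      | nil => simp [pvLoopA_nil, pvLoopB_nil]
      | cons el C' =>
        -- A pops `el` from the closure into the result; the worklist head is its suffix key
        have hel : el ∉ RA := fun hc =>
          List.disjoint_of_nodup_append hnd hc (List.mem_cons_self ..)
        have hRA : PySem.Set.add RA el = RA ++ [el] := PySem.Set.add_of_not_mem hel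
        rw [List.foldl_nil]
        have hmain := step (pvNext el) [] C' dA (RA ++ [el]) visited
          (by simp only [List.length_nil, List.length_cons] at hb ⊢; omega)
          (by rw [List.append_assoc, List.singleton_append]; exact hnd)
          hI3
          (by
            intro x hx
            apply hI4
            rwa [List.append_assoc, List.singleton_append] at hx)
        rw [List.foldl_nil] at hmain
        have heq : pvLoopA (el :: C') dA RA =
            pvLoopA (pvStep1 (C', dA) (pvNext el)).1 (pvStep1 (C', dA) (pvNext el)).2
              (RA ++ [el]) := by
          rw [pvLoopA_cons, hRA]
          cases hp : dA.pop? (pvNext el) with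
          | none => simp [pvStep1, hp]
          | some pr => simp [pvStep1, hp]
        rw [heq, hmain]
        rw [List.append_assoc, List.singleton_append]
        simp

-- ---- reachability: the common specification of both searches ----
inductive PvReach (S I : List String) : String → Prop
  | base (x : String) (hx : x ∈ I) (hk : pvKey x ∈ S) : PvReach S I x
  | step (e x : String) (he : PvReach S I e) (hx : x ∈ I) (hk : pvKey x = pvNext e) :
      PvReach S I x

-- ---- characterization of the worklist search ----

theorem pvLoopB_sound (S I : List String) :
    ∀ (queue : List String) (visited result : PySem.Set String)
      (d : PySem.Dict String (PySem.Set String)),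
      (∀ k x, x ∈ d.getD k PySem.Set.empty → x ∈ I ∧ pvKey x = k) →
      (∀ x ∈ result, PvReach S I x) →
      (∀ p ∈ queue, p ∈ S ∨ ∃ e, PvReach S I e ∧ p = pvNext e) →
      ∀ x ∈ pvLoopB queue visited result d, PvReach S I x := by
  intro queue visited result d
  induction queue, visited, result using pvLoopB.induct with
  | d => exact d
  | case1 visited result =>
    intro _ hres _ x hx
    rw [pvLoopB_nil] at hx
    exact hres x hx
  | case2 visited result pref rest hv ih =>
    intro hd hres hq x hx
    rw [pvLoopB_cons, if_pos hv] at hx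
    exact ih hd hres (fun p hp => hq p (List.mem_cons_of_mem _ hp)) x hx
  | case3 visited result pref rest hv ih =>
    intro hd hres hq x hx
    rw [pvLoopB_cons, if_neg hv] at hx
    have hentry : ∀ y ∈ d.getD pref PySem.Set.empty, PvReach S I y := by
      intro y hy
      obtain ⟨hyI, hykey⟩ := hd pref y hy
      rcases hq pref (List.mem_cons_self ..) with h1 | ⟨e, he, hpe⟩
      · exact PvReach.base y hyI (hykey ▸ h1)
      · exact PvReach.step e y he hyI (hykey.trans hpe)
    refine ih hd ?_ ?_ x hx
    · intro y hy
      rcases (PySem.Set.mem_update ..).mp hy with h1 | h1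
      · exact hres y h1
      · exact hentry y h1
    · intro p hp
      rcases List.mem_append.mp hp with h1 | h1
      · exact hq p (List.mem_cons_of_mem _ h1)
      · obtain ⟨e, he, hpe⟩ := List.mem_map.mp h1
        exact Or.inr ⟨e, hentry e he, hpe.symm⟩

theorem pvLoopB_closed :
    ∀ (queue : List String) (visited result : PySem.Set String)
      (d : PySem.Dict String (PySem.Set String)),
      (∀ p, p ∈ visited → ∀ x ∈ d.getD p PySem.Set.empty, x ∈ result) →
      (∀ e ∈ result, pvNext e ∈ queue ∨ pvNext e ∈ visited) →
      (∀ p, (p ∈ queue ∨ p ∈ visited) →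
        ∀ x ∈ d.getD p PySem.Set.empty, x ∈ pvLoopB queue visited result d) ∧
      (∀ e ∈ pvLoopB queue visited result d,
        ∀ x ∈ d.getD (pvNext e) PySem.Set.empty, x ∈ pvLoopB queue visited result d) := by
  intro queue visited result d
  induction queue, visited, result using pvLoopB.induct with
  | d => exact d
  | case1 visited result =>
    intro h1 h2
    rw [pvLoopB_nil]
    refine ⟨fun p hp => h1 p (hp.resolve_left (by simp)), fun e he => ?_⟩
    rcases h2 e he with hc | hc
    · cases hc
    · exact h1 _ hc
  | case2 visited result pref rest hv ih =>
    intro h1 h2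
    rw [pvLoopB_cons, if_pos hv]
    obtain ⟨iha, ihb⟩ := ih h1 (by
      intro e he
      rcases h2 e he with hc | hc
      · rcases List.mem_cons.mp hc with hc1 | hc1
        · exact Or.inr (hc1.symm ▸ hv)
        · exact Or.inl hc1
      · exact Or.inr hc)
    refine ⟨?_, ihb⟩
    intro p hp
    rcases hp with hp | hp
    · rcases List.mem_cons.mp hp with hp1 | hp1
      · exact iha p (Or.inr (hp1 ▸ hv))
      · exact iha p (Or.inl hp1)
    · exact iha p (Or.inr hp)
  | case3 visited result pref rest hv ih =>
    intro h1 h2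
    rw [pvLoopB_cons, if_neg hv]
    obtain ⟨iha, ihb⟩ := ih (by
        intro p hp x hx
        rcases (PySem.Set.mem_add ..).mp hp with hp1 | hp1
        · exact (PySem.Set.mem_update ..).mpr (Or.inl (h1 p hp1 x hx))
        · exact (PySem.Set.mem_update ..).mpr (Or.inr (hp1 ▸ hx)))
      (by
        intro e he
        rcases (PySem.Set.mem_update ..).mp he with he1 | he1
        · rcases h2 e he1 with hc | hc
          · rcases List.mem_cons.mp hc with hc1 | hc1
            · exact Or.inr ((PySem.Set.mem_add ..).mpr (Or.inr hc1))
            · exact Or.inl (List.mem_append.mpr (Or.inl hc1))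
          · exact Or.inr ((PySem.Set.mem_add ..).mpr (Or.inl hc))
        · exact Or.inl (List.mem_append.mpr (Or.inr (List.mem_map_of_mem he1))))
    refine ⟨?_, ihb⟩
    intro p hp
    rcases hp with hp | hp
    · rcases List.mem_cons.mp hp with hp1 | hp1
      · exact iha p (Or.inr ((PySem.Set.mem_add ..).mpr (Or.inr hp1)))
      · exact iha p (Or.inl (List.mem_append.mpr (Or.inl hp1)))
    · exact iha p (Or.inr ((PySem.Set.mem_add ..).mpr (Or.inl hp)))

theorem pvLoopB_nodup :
    ∀ (queue : List String) (visited result : PySem.Set String)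
      (d : PySem.Dict String (PySem.Set String)),
      result.Nodup → (pvLoopB queue visited result d).Nodup := by
  intro queue visited result d
  induction queue, visited, result using pvLoopB.induct with
  | d => exact d
  | case1 visited result =>
    intro h
    rwa [pvLoopB_nil]
  | case2 visited result pref rest hv ih =>
    intro h
    rw [pvLoopB_cons, if_pos hv]
    exact ih h
  | case3 visited result pref rest hv ih =>
    intro h
    rw [pvLoopB_cons, if_neg hv]
    exact ih (PySem.Set.nodup_update _ _ h)

-- ---- characterization of B's fixpoint iteration ----

-- the prefs/result invariant and soundness are preserved by one sweep
theorem pvSweep_inv (S I : List String) : ∀ (l : List String)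
    (p r : PySem.Set String) (b : Bool),
    (∀ x ∈ l, x ∈ I) →
    (∀ x, x ∈ p ↔ (x ∈ S ∨ ∃ e ∈ r, x = pvNext e)) →
    (∀ x ∈ r, x ∈ I ∧ PvReach S I x) →
    (∀ x, x ∈ (l.foldl pvSweepStep (p, r, b)).1 ↔
      (x ∈ S ∨ ∃ e ∈ (l.foldl pvSweepStep (p, r, b)).2.1, x = pvNext e)) ∧
    (∀ x ∈ (l.foldl pvSweepStep (p, r, b)).2.1, x ∈ I ∧ PvReach S I x) := by
  intro l
  induction l with
  | nil => intro p r b _ hinv hsnd; exact ⟨hinv, hsnd⟩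
  | cons inf t ih =>
    intro p r b hl hinv hsnd
    rw [List.foldl_cons]
    by_cases hg : inf ∉ r ∧ pvKey inf ∈ p
    · rw [pvSweepStep, if_pos hg]
      have hinfI : inf ∈ I := hl inf (List.mem_cons_self ..)
      have hreach : PvReach S I inf := by
        rcases (hinv (pvKey inf)).mp hg.2 with h1 | ⟨e, he, hpe⟩
        · exact PvReach.base inf hinfI h1
        · exact PvReach.step e inf (hsnd e he).2 hinfI hpe
      refine ih _ _ _ (fun x hx => hl x (List.mem_cons_of_mem _ hx)) ?_ ?_
      · intro x
        rw [PySem.Set.mem_add ..]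
        constructor
        · intro h
          rcases h with h | h
          · rcases (hinv x).mp h with h1 | ⟨e, he, hpe⟩
            · exact Or.inl h1
            · exact Or.inr ⟨e, (PySem.Set.mem_add ..).mpr (Or.inl he), hpe⟩
          · exact Or.inr ⟨inf, (PySem.Set.mem_add ..).mpr (Or.inr rfl), h⟩
        · intro h
          rcases h with h | ⟨e, he, hpe⟩
          · exact Or.inl ((hinv x).mpr (Or.inl h))
          · rcases (PySem.Set.mem_add ..).mp he with h1 | h1
            · exact Or.inl ((hinv x).mpr (Or.inr ⟨e, h1, hpe⟩))
            · exact Or.inr (h1 ▸ hpe)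
      · intro x hx
        rcases (PySem.Set.mem_add ..).mp hx with h1 | h1
        · exact hsnd x h1
        · exact h1 ▸ ⟨hinfI, hreach⟩
    · rw [pvSweepStep, if_neg hg]
      exact ih _ _ _ (fun x hx => hl x (List.mem_cons_of_mem _ hx)) hinv hsnd

-- a raised flag stays raised for the rest of the sweep
theorem pvSweep_true : ∀ (l : List String) (p r : PySem.Set String),
    (l.foldl pvSweepStep (p, r, true)).2.2 = true := by
  intro l
  induction l with
  | nil => intro p r; rfl
  | cons inf t ih =>
    intro p r
    rw [List.foldl_cons, pvSweepStep]
    split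
    · exact ih _ _
    · exact ih _ _

-- an unraised flag means the sweep changed nothing and nothing was admissible
theorem pvSweep_false : ∀ (l : List String) (p r : PySem.Set String),
    (l.foldl pvSweepStep (p, r, false)).2.2 = false →
    (l.foldl pvSweepStep (p, r, false)) = (p, r, false) ∧
    ∀ inf ∈ l, inf ∈ r ∨ pvKey inf ∉ p := by
  intro l
  induction l with
  | nil => intro p r _; exact ⟨rfl, by simp⟩
  | cons inf t ih =>
    intro p r h
    rw [List.foldl_cons] at h ⊢
    by_cases hg : inf ∉ r ∧ pvKey inf ∈ p
    · exfalso
      rw [pvSweepStep, if_pos hg] at h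
      rw [pvSweep_true] at h
      cases h
    · rw [pvSweepStep, if_neg hg] at h ⊢
      obtain ⟨h1, h2⟩ := ih p r h
      refine ⟨h1, ?_⟩
      intro x hx
      rcases List.mem_cons.mp hx with hx1 | hx1
      · subst hx1
        by_cases hxr : x ∈ r
        · exact Or.inl hxr
        · exact Or.inr (fun hc => hg ⟨hxr, hc⟩)
      · exact h2 x hx1

theorem pvSweep_nodup : ∀ (l : List String) (p r : PySem.Set String) (b : Bool),
    r.Nodup → (l.foldl pvSweepStep (p, r, b)).2.1.Nodup := by
  intro l
  induction l with
  | nil => intro p r b h; exact h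
  | cons inf t ih =>
    intro p r b h
    rw [List.foldl_cons, pvSweepStep]
    split
    · exact ih _ _ _ (PySem.Set.nodup_add _ _ h)
    · exact ih _ _ _ h

-- bridge between the `attach`ed fold in pvFix's induction principle and the fold itself
theorem pvSweepStep_attach (I : List String) (p r : PySem.Set String) (b : Bool) :
    (List.foldl (fun s (x : {x // x ∈ I}) => pvSweepStep s x.1) (p, r, b) I.attach)
      = I.foldl pvSweepStep (p, r, b) := List.foldl_attach

theorem pvFix_sound (S : List String) : ∀ (I : List String) (p r : PySem.Set String),
    (∀ x, x ∈ p ↔ (x ∈ S ∨ ∃ e ∈ r, x = pvNext e)) →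
    (∀ x ∈ r, x ∈ I ∧ PvReach S I x) →
    ∀ x ∈ pvFix I p r, x ∈ I ∧ PvReach S I x := by
  intro I p r
  induction p, r using pvFix.induct with
  | infixes => exact I
  | case1 p r hflag ih =>
    intro hinv hsnd x hx
    rw [pvSweepStep_attach] at hflag ih
    have hflag' : (I.foldl pvSweepStep (p, r, false)).2.2 = true := hflag
    rw [pvFix, if_pos hflag'] at hx
    obtain ⟨hinv', hsnd'⟩ := pvSweep_inv S I I p r false (fun x hx => hx) hinv hsnd
    exact ih hinv' hsnd' x hx
  | case2 p r hflag =>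
    intro hinv hsnd x hx
    rw [pvSweepStep_attach] at hflag
    have hflag' : ¬ (I.foldl pvSweepStep (p, r, false)).2.2 = true := hflag
    rw [pvFix, if_neg hflag'] at hx
    obtain ⟨_, hsnd'⟩ := pvSweep_inv S I I p r false (fun x hx => hx) hinv hsnd
    exact hsnd' x hx

theorem pvFix_complete (S : List String) : ∀ (I : List String) (p r : PySem.Set String),
    (∀ x, x ∈ p ↔ (x ∈ S ∨ ∃ e ∈ r, x = pvNext e)) →
    (∀ x ∈ r, x ∈ I ∧ PvReach S I x) →
    ∀ x, PvReach S I x → x ∈ pvFix I p r := by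
  intro I p r
  induction p, r using pvFix.induct with
  | infixes => exact I
  | case1 p r hflag ih =>
    intro hinv hsnd x hx
    rw [pvSweepStep_attach] at hflag ih
    have hflag' : (I.foldl pvSweepStep (p, r, false)).2.2 = true := hflag
    rw [pvFix, if_pos hflag']
    obtain ⟨hinv', hsnd'⟩ := pvSweep_inv S I I p r false (fun x hx => hx) hinv hsnd
    exact ih hinv' hsnd' x hx
  | case2 p r hflag =>
    intro hinv _ x hx
    rw [pvSweepStep_attach] at hflag
    have hflag' : ¬ (I.foldl pvSweepStep (p, r, false)).2.2 = true := hflag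
    rw [pvFix, if_neg hflag']
    obtain ⟨hfixed, hclosed⟩ := pvSweep_false I p r (by
      cases hb : (I.foldl pvSweepStep (p, r, false)).2.2
      · rfl
      · exact absurd hb hflag')
    rw [hfixed]
    induction hx with
    | base y hyI hyk =>
      rcases hclosed y hyI with h1 | h1
      · exact h1
      · exact absurd ((hinv (pvKey y)).mpr (Or.inl hyk)) h1
    | step e y he hyI hyk ihr =>
      rcases hclosed y hyI with h1 | h1
      · exact h1
      · exact absurd ((hinv (pvKey y)).mpr (Or.inr ⟨e, ihr, hyk⟩)) h1

theorem pvFix_nodup : ∀ (I : List String) (p r : PySem.Set String),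
    r.Nodup → (pvFix I p r).Nodup := by
  intro I p r
  induction p, r using pvFix.induct with
  | infixes => exact I
  | case1 p r hflag ih =>
    intro h
    rw [pvSweepStep_attach] at hflag ih
    have hflag' : (I.foldl pvSweepStep (p, r, false)).2.2 = true := hflag
    rw [pvFix, if_pos hflag']
    exact ih (pvSweep_nodup I p r false h)
  | case2 p r hflag =>
    intro h
    rw [pvSweepStep_attach] at hflag
    have hflag' : ¬ (I.foldl pvSweepStep (p, r, false)).2.2 = true := hflag
    rw [pvFix, if_neg hflag']
    exact pvSweep_nodup I p r false h

-- ===== VERDICT (by name: the statement is the Claim_ definition above) =====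
theorem string_transitive_closure_spec : Claim_equal_string_transitive_closure := by
  unfold Claim_equal_string_transitive_closure
  intro s i _
  unfold Spec_string_transitive_closure
  simp only [string_transitive_closure, string_transitive_closure_alt]
  set d0 := i.foldl (fun d inf => d.modify (pvKey inf) PySem.Set.empty
    (fun s => PySem.Set.add s inf)) PySem.Dict.empty with hd0
  have Hk : ∀ k v, d0.get? k = some v → v.Nodup ∧ ∀ e ∈ v, pvKey e = k := by
    apply pvDictInv
    intro k v h
    rw [PySem.Dict.get?_empty] at h
    cases h
  -- A's loop equals the worklist search
  have hsim := pvSim d0 Hk (s.length + 0 + pvRemW d0.items PySem.Set.empty) s [] d0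
    PySem.Set.empty PySem.Set.empty (by simp [PySem.Set.empty])
    (by simp [PySem.Set.empty])
    (by intro k; rw [if_neg (by simp [PySem.Set.empty])])
    (by intro x hx; simp [PySem.Set.empty] at hx)
  have hA : pvLoopA (s.foldl pvStep1 (PySem.Set.empty, d0)).1
      (s.foldl pvStep1 (PySem.Set.empty, d0)).2 PySem.Set.empty
      = pvLoopB s PySem.Set.empty PySem.Set.empty d0 := by
    simpa [PySem.Set.empty] using hsim
  rw [hA]
  -- dict value facts
  have hd : ∀ k x, x ∈ d0.getD k PySem.Set.empty → x ∈ i ∧ pvKey x = k := by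
    intro k x hx
    rw [PySem.Dict.getD_eq_get?_getD] at hx
    cases hg : d0.get? k with
    | none => rw [hg] at hx; simp [PySem.Set.empty] at hx
    | some v =>
      rw [hg] at hx
      simp only [Option.getD_some] at hx
      refine ⟨?_, (Hk k v hg).2 x hx⟩
      exact pvDictValsMem i i PySem.Dict.empty (fun y hy => hy)
        (by intro k' v' h'; rw [PySem.Dict.get?_empty] at h'; cases h') k v hg x hx
  -- the worklist search computes exactly the reachable infixes
  have hOmem : ∀ x, x ∈ pvLoopB s PySem.Set.empty PySem.Set.empty d0 ↔ PvReach s i x := by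
    intro x
    constructor
    · exact fun hx => pvLoopB_sound s i s PySem.Set.empty PySem.Set.empty d0 hd
        (by intro y hy; simp [PySem.Set.empty] at hy)
        (fun p hp => Or.inl hp) x hx
    · intro hx
      obtain ⟨hcl1, hcl2⟩ := pvLoopB_closed s PySem.Set.empty PySem.Set.empty d0
        (by intro p hp; simp [PySem.Set.empty] at hp)
        (by intro e he; simp [PySem.Set.empty] at he)
      induction hx with
      | base y hyI hyk =>
        exact hcl1 (pvKey y) (Or.inl hyk) y
          (pvDictMem i PySem.Dict.empty y (Or.inl hyI))
      | step e y he hyI hyk ihr =>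
        have hy : y ∈ d0.getD (pvNext e) PySem.Set.empty :=
          hyk ▸ pvDictMem i PySem.Dict.empty y (Or.inl hyI)
        exact hcl2 e ihr y hy
  -- B's fixpoint computes exactly the reachable infixes
  have hFmem : ∀ x, x ∈ pvFix i (PySem.Set.ofList s) PySem.Set.empty ↔ PvReach s i x := by
    intro x
    have hinv : ∀ y, y ∈ PySem.Set.ofList s ↔
        (y ∈ s ∨ ∃ e ∈ PySem.Set.empty, y = pvNext e) := by
      intro y
      rw [PySem.Set.mem_ofList]
      simp [PySem.Set.empty]
    have hsnd : ∀ y ∈ (PySem.Set.empty : PySem.Set String), y ∈ i ∧ PvReach s i y := by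
      intro y hy; simp [PySem.Set.empty] at hy
    constructor
    · exact fun hx => (pvFix_sound s i (PySem.Set.ofList s) PySem.Set.empty hinv hsnd x hx).2
    · exact fun hx => pvFix_complete s i (PySem.Set.ofList s) PySem.Set.empty hinv hsnd x hx
  -- equal as sets, both duplicate-free, hence equal once sorted
  have hperm : (pvLoopB s PySem.Set.empty PySem.Set.empty d0).Perm
      (pvFix i (PySem.Set.ofList s) PySem.Set.empty) := by
    rw [List.perm_ext_iff_of_nodup
      (pvLoopB_nodup s PySem.Set.empty PySem.Set.empty d0 List.nodup_nil)
      (pvFix_nodup i (PySem.Set.ofList s) PySem.Set.empty List.nodup_nil)]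
    intro a
    rw [hOmem, hFmem]
  exact PySem.List.sorted_eq_sorted_of_perm _ _ _ (fun a b h => h) hperm
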